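-- pv_equiv track=rewrite | github.com/TsvetanG2/Python-Advanced | Exam/v3.py | find_mouse
-- ===== SOURCE A (Python) =====
-- def find_mouse(matrix):
--     rows, cols = len(matrix), len(matrix[0])
--     mouse_pos = None
--     cheese_count = 0
--     trap_pos = None
--
--     for r in range(rows):
--         for c in range(cols):
--             if matrix[r][c] == 'M':
--                 mouse_pos = (r, c)
--             elif matrix[r][c] == 'C':
--                 cheese_count += 1
--             elif matrix[r][c] == 'T':
--                 trap_pos = (r, c)
--
--     return mouse_pos, cheese_count, trap_pos
-- ===== SOURCE B (Python) =====
-- def find_mouse(matrix):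
--     rows, cols = len(matrix), len(matrix[0])
--
--     def rfind(ch):
--         # reverse row-major search: first hit equals A's last-occurrence
--         for r in range(rows - 1, -1, -1):
--             for c in range(cols - 1, -1, -1):
--                 if matrix[r][c] == ch:
--                     return (r, c)
--         return None
--
--     cheese_count = sum(row[:cols].count('C') for row in matrix)
--     return rfind('M'), cheese_count, rfind('T')
-- ===== Notes on version B (the rewrite author's own statement) =====
-- stated objective: alternative
-- what changed: Replaces the single row-major scan with three independent passes: cheese via per-row count of sliced rows summed, and mouse/trap each by a short-circuiting reverse row-major search that returns the first hit (equal to A's last occurrence).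
import Mathlib
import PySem

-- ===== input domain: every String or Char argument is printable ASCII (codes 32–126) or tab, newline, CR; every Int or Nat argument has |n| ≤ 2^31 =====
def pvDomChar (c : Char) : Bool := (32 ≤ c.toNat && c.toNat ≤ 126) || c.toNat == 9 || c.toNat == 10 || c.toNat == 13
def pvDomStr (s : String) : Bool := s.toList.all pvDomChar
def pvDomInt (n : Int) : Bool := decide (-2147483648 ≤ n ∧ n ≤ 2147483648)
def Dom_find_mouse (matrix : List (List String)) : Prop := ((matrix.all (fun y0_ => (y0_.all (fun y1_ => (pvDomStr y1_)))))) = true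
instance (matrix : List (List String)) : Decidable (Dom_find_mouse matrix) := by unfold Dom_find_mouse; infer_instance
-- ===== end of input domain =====

-- B replaces A's single row-major scan by three independent passes (per-row counting for
-- cheese, short-circuiting reverse row-major searches for mouse and trap); alternative
-- decomposition, same asymptotic cost.

-- ===== PORT A =====
def find_mouse (matrix : List (List String)) : (Option (Int × Int)) × Int × (Option (Int × Int)) :=
  let rows : Int := matrix.length
  let cols : Int := ((PySem.List.pyGetD matrix 0 []).length : Int)
  (PySem.List.pyRange 0 rows 1).foldl (fun st r =>
    (PySem.List.pyRange 0 cols 1).foldl (fun st c =>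
      let cell := PySem.List.pyGetD (PySem.List.pyGetD matrix r []) c ""
      if cell = "M" then (some (r, c), st.2.1, st.2.2)
      else if cell = "C" then (st.1, st.2.1 + 1, st.2.2)
      else if cell = "T" then (st.1, st.2.1, some (r, c))
      else st) st) (none, 0, none)

-- ===== PORT B =====
-- helper = Source B's inner `rfind`: reverse row-major search, first hit wins
def pvRfind (matrix : List (List String)) (rows cols : Int) (ch : String) : Option (Int × Int) :=
  (PySem.List.pyRange (rows - 1) (-1) (-1)).findSome? (fun r =>
    (PySem.List.pyRange (cols - 1) (-1) (-1)).findSome? (fun c =>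
      if PySem.List.pyGetD (PySem.List.pyGetD matrix r []) c "" = ch then some (r, c) else none))

def find_mouse_alt (matrix : List (List String)) : (Option (Int × Int)) × Int × (Option (Int × Int)) :=
  let rows : Int := matrix.length
  let cols : Int := ((PySem.List.pyGetD matrix 0 []).length : Int)
  let cheese_count : Int :=
    (matrix.map (fun row => (PySem.List.count (PySem.List.slice row none (some cols)) "C" : Int))).sum
  (pvRfind matrix rows cols "M", cheese_count, pvRfind matrix rows cols "T")

-- ===== PRECONDITION & SPEC =====
-- Pre_ excludes exactly the inputs where Python A raises IndexError: the empty matrix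
-- (matrix[0]) and ragged matrices with some row shorter than the first row (matrix[r][c]).
def Pre_find_mouse (matrix : List (List String)) : Prop :=
  matrix ≠ [] ∧ ∀ row ∈ matrix, (matrix.headD []).length ≤ row.length
instance (matrix : List (List String)) : Decidable (Pre_find_mouse matrix) := by unfold Pre_find_mouse; infer_instance

def pvWitness_find_mouse : List (List String) := [["M", "C"], ["T", "."]]

def Spec_find_mouse (matrix : List (List String)) (out : (Option (Int × Int)) × Int × (Option (Int × Int))) : Prop := out = find_mouse_alt matrix
instance (matrix : List (List String)) (out : (Option (Int × Int)) × Int × (Option (Int × Int))) : Decidable (Spec_find_mouse matrix out) := by unfold Spec_find_mouse; infer_instance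

-- ===== CLAIM (what is proved, stated in full; the proofs are below) =====
def Claim_equal_find_mouse : Prop := ∀ (matrix : List (List String)), Dom_find_mouse matrix → Pre_find_mouse matrix → Spec_find_mouse matrix (find_mouse matrix)

-- ===== LEMMAS AND PROOFS =====

-- the state-update step of A's loop, over flattened (r, c) pairs with cell lookup f
def pvStep (f : Int × Int → String) (st : (Option (Int × Int)) × Int × (Option (Int × Int))) (p : Int × Int) :
    (Option (Int × Int)) × Int × (Option (Int × Int)) :=
  if f p = "M" then (some p, st.2.1, st.2.2)
  else if f p = "C" then (st.1, st.2.1 + 1, st.2.2)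
  else if f p = "T" then (st.1, st.2.1, some p) else st

-- A's fold, characterised: last-match (= first match of the reversed list) for M and T, count for C
theorem pvFold_char (f : Int × Int → String) (L : List (Int × Int)) (m0 t0 : Option (Int × Int)) (c0 : Int) :
    L.foldl (pvStep f) (m0, c0, t0) =
      ((L.reverse.findSome? (fun p => if f p = "M" then some p else none)).or m0,
       c0 + (L.countP (fun p => f p == "C") : Int),
       (L.reverse.findSome? (fun p => if f p = "T" then some p else none)).or t0) := by
  induction L generalizing m0 c0 t0 with
  | nil => simp
  | cons p L ih =>
      rw [List.foldl_cons, ih]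
      simp only [List.reverse_cons, List.findSome?_append, List.countP_cons, pvStep]
      by_cases hM : f p = "M" <;> by_cases hC : f p = "C" <;> by_cases hT : f p = "T" <;>
        simp [hM, hC, hT] <;> push_cast <;> ring

-- countdown range is the reverse of the forward range
theorem pvRange_countdown (n : Nat) :
    PySem.List.pyRange ((n : Int) - 1) (-1) (-1) = (PySem.List.pyRange 0 (n : Int) 1).reverse := by
  induction n with
  | zero => simp [PySem.List.pyRange_neg_one_eq_nil, PySem.List.pyRange_one_eq_nil]
  | succ k ih =>
      have h1 : ((k + 1 : Nat) : Int) - 1 = (k : Int) := by push_cast; ring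
      rw [h1, PySem.List.pyRange_neg_one_cons (by omega),
          show ((k + 1 : Nat) : Int) = (k : Int) + 1 by push_cast; ring,
          PySem.List.pyRange_one_succ_right (by omega), List.reverse_append]
      simp [ih]

-- findSome? distributes over flatMap
theorem pvFindSome?_flatMap {α β γ : Type} (l : List α) (f : α → List β) (g : β → Option γ) :
    (l.flatMap f).findSome? g = l.findSome? (fun x => (f x).findSome? g) := by
  induction l with
  | nil => simp
  | cons x l ih =>
      rw [List.flatMap_cons, List.findSome?_append, ih]
      cases hx : (f x).findSome? g <;> simp [hx]

-- a prefix of a list, written by indices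
theorem pvTake_eq_map_range {α : Type} (d : α) (row : List α) (m : Nat) (h : m ≤ row.length) :
    row.take m = (List.range m).map (fun k => row.getD k d) := by
  apply List.ext_getElem
  · simp [h]
  · intro i h1 h2
    simp only [List.length_take] at h1
    have : i < row.length := lt_of_lt_of_le (lt_min_iff.mp h1).1 h
    simp [List.getD_eq_getElem?_getD, this]

-- a map over a list, written by indices
theorem pvMapIdx {α β : Type} (d : α) (g : α → β) (l : List α) :
    l.map g = (List.range l.length).map (fun r => g (l.getD r d)) := by
  apply List.ext_getElem
  · simp
  · intro i h1 h2
    simp only [List.length_map] at h1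
    simp [List.getD_eq_getElem?_getD, h1]

-- B's sliced per-row count equals A's inner column scan count
theorem pvRow_count (row : List String) (m : Nat) (h : m ≤ row.length) :
    PySem.List.count (PySem.List.slice row none (some (m : Int))) "C"
      = (PySem.List.pyRange 0 (m : Int) 1).countP
          (fun c => PySem.List.pyGetD row c "" == "C") := by
  rw [PySem.List.slice_to_natCast, PySem.List.count_eq, List.count_eq_countP, pvTake_eq_map_range "" row m h,
      List.countP_map, PySem.List.pyRange_zero_nat, List.countP_map]
  simp [Function.comp_def]

-- B's cheese pass equals the count of 'C' cells over the flattened index pairs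
theorem pvCheese (matrix : List (List String)) (m : Nat) (hm : ∀ row ∈ matrix, m ≤ row.length) :
    ((((PySem.List.pyRange 0 (matrix.length : Int) 1).flatMap
          (fun r => (PySem.List.pyRange 0 (m : Int) 1).map (fun c => (r, c)))).countP
        (fun p => PySem.List.pyGetD (PySem.List.pyGetD matrix p.1 []) p.2 "" == "C") : Nat) : Int)
      = (matrix.map (fun row =>
          (PySem.List.count (PySem.List.slice row none (some (m : Int))) "C" : Int))).sum := by
  rw [List.countP_flatMap, PySem.List.pyRange_zero_nat (n := matrix.length), List.map_map,
      Nat.cast_list_sum, List.map_map, pvMapIdx []]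
  apply congrArg List.sum
  apply List.map_congr_left
  intro r hr
  simp only [List.mem_range] at hr
  have hmem : matrix.getD r [] ∈ matrix := by
    rw [List.getD_eq_getElem?_getD, List.getElem?_eq_getElem hr]
    exact List.getElem_mem hr
  simp only [Function.comp_def, List.countP_map]
  rw [pvRow_count _ m (hm _ hmem)]
  congr 1
  apply List.countP_congr
  intro c _
  simp [PySem.List.pyGetD_natCast]

-- ===== VERDICT (by name: the statement is the Claim_ definition above) =====
theorem find_mouse_spec : Claim_equal_find_mouse := by
  intro matrix _hdom hpre
  unfold Spec_find_mouse
  obtain ⟨hne, hlen⟩ := hpre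
  have hhead : PySem.List.pyGetD matrix 0 [] = matrix.headD [] := by
    cases matrix with
    | nil => simp [PySem.List.pyGetD, PySem.List.pyGet?]
    | cons a l => simp [PySem.List.pyGetD, PySem.List.pyGet?, PySem.List.pyIdx?]
  have hA : find_mouse matrix =
      (((PySem.List.pyRange 0 (matrix.length : Int) 1).flatMap
          (fun r => (PySem.List.pyRange 0 ((matrix.headD []).length : Int) 1).map (fun c => (r, c)))).foldl
        (pvStep (fun p => PySem.List.pyGetD (PySem.List.pyGetD matrix p.1 []) p.2 ""))
        (none, 0, none)) := by
    rw [List.foldl_flatMap]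
    simp [find_mouse, hhead, List.foldl_map, pvStep]
  have hRf : ∀ ch, pvRfind matrix (matrix.length : Int) ((matrix.headD []).length : Int) ch =
      (((PySem.List.pyRange 0 (matrix.length : Int) 1).flatMap
          (fun r => (PySem.List.pyRange 0 ((matrix.headD []).length : Int) 1).map (fun c => (r, c)))).reverse.findSome?
        (fun p => if PySem.List.pyGetD (PySem.List.pyGetD matrix p.1 []) p.2 "" = ch then some p else none)) := by
    intro ch
    rw [List.reverse_flatMap, pvFindSome?_flatMap]
    simp [pvRfind, pvRange_countdown, Function.comp_def, List.findSome?_map, ← List.map_reverse]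
  rw [hA, pvFold_char]
  simp only [find_mouse_alt, hhead, hRf, Option.or_none, zero_add]
  rw [pvCheese matrix (matrix.headD []).length hlen]
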